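-- pv_equiv track=rewrite | github.com/NewtMercado/Fundamentos-de-Programacion-con-Python-Mision-TIC-2022 | 3 - Actividades/4_1_reto_4(final).py | VerificarFallas
-- ===== SOURCE A (Python) =====
-- def VerificarFallas(SerieDeBaldosas_B, MemoriaSensor_K):
--   FallasTotales = 0
--   FallasDetectadas = 0
--   Diccionario = dict()
--
--   for Veces_OrdenLectura, TipoDeBaldosa in enumerate(SerieDeBaldosas_B):
--     if (TipoDeBaldosa in Diccionario and Veces_OrdenLectura - Diccionario.get(TipoDeBaldosa) <= MemoriaSensor_K):
--       FallasDetectadas = FallasDetectadas + 1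
--     if (TipoDeBaldosa in Diccionario):
--       FallasTotales = FallasTotales + 1
--     Diccionario[TipoDeBaldosa]= Veces_OrdenLectura
--
--
--   return FallasTotales, FallasDetectadas
-- ===== SOURCE B (Python) =====
-- def VerificarFallas(SerieDeBaldosas_B, MemoriaSensor_K):
--     FallasTotales = 0
--     FallasDetectadas = 0
--     for i, t in enumerate(SerieDeBaldosas_B):
--         if t in SerieDeBaldosas_B[:i]:
--             FallasTotales += 1
--             if t in SerieDeBaldosas_B[max(0, i - MemoriaSensor_K):i]:
--                 FallasDetectadas += 1
--     return FallasTotales, FallasDetectadas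
-- ===== Notes on version B (the rewrite author's own statement) =====
-- stated objective: simpler
-- what changed: B drops the dict of last-seen indices entirely: for each position it tests membership of the tile directly in the prefix slice (repeat ever) and in the last-K window slice (repeat within memory), nesting the window test inside the prefix test; simpler but slower on large inputs.
import Mathlib
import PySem

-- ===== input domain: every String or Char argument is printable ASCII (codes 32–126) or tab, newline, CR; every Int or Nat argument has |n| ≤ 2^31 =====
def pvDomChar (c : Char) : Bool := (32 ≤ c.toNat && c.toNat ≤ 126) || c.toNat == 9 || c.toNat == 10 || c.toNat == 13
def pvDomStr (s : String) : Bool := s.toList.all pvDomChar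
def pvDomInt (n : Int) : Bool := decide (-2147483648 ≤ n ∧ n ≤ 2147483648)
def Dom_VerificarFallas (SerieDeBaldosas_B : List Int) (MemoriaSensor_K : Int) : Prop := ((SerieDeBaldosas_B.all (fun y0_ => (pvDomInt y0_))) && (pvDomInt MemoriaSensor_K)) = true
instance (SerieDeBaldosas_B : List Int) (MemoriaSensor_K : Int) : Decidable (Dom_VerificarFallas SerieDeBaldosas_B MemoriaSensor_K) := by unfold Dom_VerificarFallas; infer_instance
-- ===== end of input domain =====

-- B replaces A's dict of last-seen indices by direct membership tests in two slices
-- (the whole prefix and the last-K window); objective: simpler, not faster.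

-- ===== PORT A =====
-- one step of A's loop body: detect (within memory), count (seen before), record last index
def stepA (K : Int) (s : Int × Int × PySem.Dict Int Int) (p : Int × Int) : Int × Int × PySem.Dict Int Int :=
  let det :=
    if s.2.2.contains p.2 then
      match s.2.2.get? p.2 with
      | some j => if p.1 - j ≤ K then s.2.1 + 1 else s.2.1
      | none => s.2.1
    else s.2.1
  let tot := if s.2.2.contains p.2 then s.1 + 1 else s.1
  (tot, det, s.2.2.insert p.2 p.1)

def VerificarFallas (SerieDeBaldosas_B : List Int) (MemoriaSensor_K : Int) : Int × Int :=
  let r := (PySem.List.enumerate SerieDeBaldosas_B 0).foldl (stepA MemoriaSensor_K)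
             (0, 0, PySem.Dict.empty)
  (r.1, r.2.1)

-- ===== PORT B =====
-- one step of B's loop body: membership in the prefix slice, then in the window slice
def stepB (b : List Int) (K : Int) (s : Int × Int) (p : Int × Int) : Int × Int :=
  if p.2 ∈ PySem.List.slice b none (some p.1) then
    if p.2 ∈ PySem.List.slice b (some (max 0 (p.1 - K))) (some p.1) then
      (s.1 + 1, s.2 + 1)
    else (s.1 + 1, s.2)
  else s

def VerificarFallas_alt (SerieDeBaldosas_B : List Int) (MemoriaSensor_K : Int) : Int × Int :=
  (PySem.List.enumerate SerieDeBaldosas_B 0).foldl (stepB SerieDeBaldosas_B MemoriaSensor_K) (0, 0)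

-- ===== PRECONDITION & SPEC =====
def Spec_VerificarFallas (SerieDeBaldosas_B : List Int) (MemoriaSensor_K : Int) (out : Int × Int) : Prop := out = VerificarFallas_alt SerieDeBaldosas_B MemoriaSensor_K
instance (SerieDeBaldosas_B : List Int) (MemoriaSensor_K : Int) (out : Int × Int) : Decidable (Spec_VerificarFallas SerieDeBaldosas_B MemoriaSensor_K out) := by unfold Spec_VerificarFallas; infer_instance

-- ===== CLAIM (what is proved, stated in full; the proofs are below) =====
def Claim_equal_VerificarFallas : Prop := ∀ (SerieDeBaldosas_B : List Int) (MemoriaSensor_K : Int), Dom_VerificarFallas SerieDeBaldosas_B MemoriaSensor_K → Spec_VerificarFallas SerieDeBaldosas_B MemoriaSensor_K (VerificarFallas SerieDeBaldosas_B MemoriaSensor_K)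

-- ===== LEMMAS AND PROOFS =====

-- j is the index of the LAST occurrence of t in p
def LastOcc (p : List Int) (t : Int) (j : Int) : Prop :=
  ∃ m : Nat, j = (m : Int) ∧ p[m]? = some t ∧ ∀ k : Nat, m < k → p[k]? ≠ some t

theorem lastOcc_unique {p : List Int} {t j j' : Int}
    (h : LastOcc p t j) (h' : LastOcc p t j') : j = j' := by
  obtain ⟨m, rfl, hm, hmax⟩ := h
  obtain ⟨m', rfl, hm', hmax'⟩ := h'
  rcases Nat.lt_trichotomy m m' with hlt | heq | hgt
  · exact absurd hm' (hmax m' hlt)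
  · simp [heq]
  · exact absurd hm (hmax' m hgt)

theorem lastOcc_mem {p : List Int} {t j : Int} (h : LastOcc p t j) : t ∈ p := by
  obtain ⟨m, rfl, hm, _⟩ := h
  exact List.mem_of_getElem? hm

theorem lastOcc_append_self (p : List Int) (x : Int) :
    LastOcc (p ++ [x]) x (p.length : Int) := by
  refine ⟨p.length, rfl, ?_, ?_⟩
  · simp
  · intro k hk
    have hlen : (p ++ [x]).length ≤ k := by simp; omega
    simp [List.getElem?_eq_none hlen]

theorem lastOcc_append_of_ne {p : List Int} {t j x : Int} (hne : t ≠ x) :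
    LastOcc (p ++ [x]) t j ↔ LastOcc p t j := by
  constructor
  · rintro ⟨m, rfl, hm, hmax⟩
    have hmlt : m < p.length := by
      have hb := (List.getElem?_eq_some_iff.mp hm).1
      simp only [List.length_append, List.length_cons, List.length_nil] at hb
      rcases Nat.lt_or_ge m p.length with h | h
      · exact h
      · have hme : m = p.length := by omega
        subst hme
        rw [List.getElem?_concat_length] at hm
        exact absurd (Option.some.inj hm).symm hne
    refine ⟨m, rfl, ?_, ?_⟩
    · rw [List.getElem?_append_left hmlt] at hm; exact hm
    · intro k hk hkc
      have hklt : k < p.length := (List.getElem?_eq_some_iff.mp hkc).1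
      exact hmax k hk (by rw [List.getElem?_append_left hklt]; exact hkc)
  · rintro ⟨m, rfl, hm, hmax⟩
    have hmlt : m < p.length := (List.getElem?_eq_some_iff.mp hm).1
    refine ⟨m, rfl, by rw [List.getElem?_append_left hmlt]; exact hm, ?_⟩
    intro k hk
    rcases Nat.lt_trichotomy k p.length with h | h | h
    · rw [List.getElem?_append_left h]; exact hmax k hk
    · subst h
      rw [List.getElem?_concat_length]
      intro hc
      exact hne (Option.some.inj hc).symm
    · rw [List.getElem?_eq_none (by simp; omega)]; simp

theorem exists_lastOcc (p : List Int) (t : Int) (h : t ∈ p) : ∃ j, LastOcc p t j := by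
  induction p using List.reverseRecOn with
  | nil => simp at h
  | append_singleton p a ih =>
    by_cases hx : t = a
    · subst hx; exact ⟨(p.length : Int), lastOcc_append_self p t⟩
    · have ht : t ∈ p := by
        rcases List.mem_append.mp h with h' | h'
        · exact h'
        · simp at h'; exact absurd h' hx
      obtain ⟨j, hj⟩ := ih ht
      exact ⟨j, (lastOcc_append_of_ne hx).mpr hj⟩

-- membership in a drop/take window, via absolute indices
theorem mem_drop_take {b : List Int} {L M : Nat} {t : Int} :
    t ∈ (b.drop L).take M ↔ ∃ m : Nat, L ≤ m ∧ m < L + M ∧ b[m]? = some t := by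
  constructor
  · intro h
    obtain ⟨i, hi⟩ := List.mem_iff_getElem?.mp h
    have hiM : i < M := by
      have hb := (List.getElem?_eq_some_iff.mp hi).1
      simp [List.length_take] at hb
      omega
    refine ⟨L + i, by omega, by omega, ?_⟩
    rw [List.getElem?_take_of_lt hiM, List.getElem?_drop] at hi
    exact hi
  · rintro ⟨m, hLm, hmM, hm⟩
    apply List.mem_iff_getElem?.mpr
    refine ⟨m - L, ?_⟩
    rw [List.getElem?_take_of_lt (by omega), List.getElem?_drop]
    have : L + (m - L) = m := by omega
    rw [this]; exact hm

-- the dict invariant maintained by A's loop: the dict maps each tile seen in the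
-- processed prefix to the index of its last occurrence there
def DictInv (b : List Int) (n : Nat) (D : PySem.Dict Int Int) : Prop :=
  ∀ t j, D.get? t = some j ↔ LastOcc (b.take n) t j

theorem mem_prefix_iff {b : List Int} {n : Nat} {D : PySem.Dict Int Int}
    (hInv : DictInv b n D) (x : Int) : x ∈ b.take n ↔ D.contains x = true := by
  rw [PySem.Dict.contains_eq_isSome_get?]
  constructor
  · intro h
    obtain ⟨j, hj⟩ := exists_lastOcc _ _ h
    rw [(hInv x j).mpr hj]; rfl
  · intro h
    obtain ⟨j, hj⟩ := Option.isSome_iff_exists.mp h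
    exact lastOcc_mem ((hInv x j).mp hj)

theorem mem_window_iff {b : List Int} {n : Nat} {D : PySem.Dict Int Int} {K : Int}
    (hInv : DictInv b n D) (x : Int) :
    x ∈ PySem.List.slice b (some (max 0 ((n : Int) - K))) (some (n : Int)) ↔
      ∃ j, D.get? x = some j ∧ (n : Int) - j ≤ K := by
  have ha : (0 : Int) ≤ max 0 ((n : Int) - K) := le_max_left 0 _
  rw [PySem.List.slice_toNat b ha (Int.natCast_nonneg n), mem_drop_take]
  have haN : ((max 0 ((n : Int) - K)).toNat : Int) = max 0 ((n : Int) - K) :=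
    Int.toNat_of_nonneg ha
  constructor
  · rintro ⟨m, hLm, hmM, hm⟩
    have hmn : m < n := by omega
    have hxmem : x ∈ b.take n := by
      rw [show b.take n = (b.drop 0).take n by simp, mem_drop_take]
      exact ⟨m, by omega, by omega, hm⟩
    obtain ⟨j, hj⟩ := exists_lastOcc _ _ hxmem
    refine ⟨j, (hInv x j).mpr hj, ?_⟩
    obtain ⟨m0, rfl, hm0, hmax⟩ := hj
    have hmle : m ≤ m0 := by
      by_contra hcon
      exact hmax m (by omega) (by rw [List.getElem?_take_of_lt hmn]; exact hm)
    omega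
  · rintro ⟨j, hj, hcond⟩
    obtain ⟨m0, rfl, hm0, _⟩ := (hInv x j).mp hj
    have hm0n : m0 < n := by
      have hb := (List.getElem?_eq_some_iff.mp hm0).1
      simp [List.length_take] at hb
      omega
    have hbm0 : b[m0]? = some x := by
      rw [List.getElem?_take_of_lt hm0n] at hm0; exact hm0
    exact ⟨m0, by omega, by omega, hbm0⟩

theorem mainLoop (b : List Int) (K : Int) :
    ∀ (l : List Int) (n : Nat) (tot det : Int) (D : PySem.Dict Int Int),
      b.drop n = l → DictInv b n D →
      (let r := (PySem.List.enumerate l (n : Int)).foldl (stepA K) (tot, det, D)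
       (r.1, r.2.1)) = (PySem.List.enumerate l (n : Int)).foldl (stepB b K) (tot, det) := by
  intro l
  induction l with
  | nil => intro n tot det D _ _; simp [PySem.List.enumerate_nil]
  | cons x l' ih =>
    intro n tot det D hdrop hInv
    have hbn : b[n]? = some x := by
      have h0 : (b.drop n)[0]? = b[n]? := by rw [List.getElem?_drop]; norm_num
      rw [hdrop] at h0; simpa using h0.symm
    have hnlen : n < b.length := (List.getElem?_eq_some_iff.mp hbn).1
    have htake : b.take (n + 1) = b.take n ++ [x] := by
      rw [List.take_add_one, hbn]; rfl
    have hlentake : (b.take n).length = n := by simp [List.length_take]; omega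
    have hdrop' : b.drop (n + 1) = l' := by
      have : b.drop (n + 1) = (b.drop n).drop 1 := by rw [List.drop_drop]
      rw [this, hdrop]; rfl
    have hInv' : DictInv b (n + 1) (D.insert x (n : Int)) := by
      intro t j
      rw [htake]
      by_cases hx : t = x
      · subst hx
        rw [PySem.Dict.get?_insert_self]
        constructor
        · intro h
          have hj : j = (n : Int) := (Option.some.inj h).symm
          subst hj
          have := lastOcc_append_self (b.take n) t
          rwa [hlentake] at this
        · intro h
          have := lastOcc_unique h (lastOcc_append_self (b.take n) t)
          rw [this, hlentake]
      · rw [PySem.Dict.get?_insert_of_ne D ((n : Int)) hx, hInv t j, lastOcc_append_of_ne hx]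
    have hcast : (n : Int) + 1 = ((n + 1 : Nat) : Int) := by push_cast; ring
    rw [PySem.List.enumerate_cons]
    simp only [List.foldl_cons]
    have hpre : x ∈ PySem.List.slice b none (some (n : Int)) ↔ D.contains x = true := by
      rw [PySem.List.slice_to_natCast]
      exact mem_prefix_iff hInv x
    have hwin := mem_window_iff (K := K) hInv x
    by_cases hc : D.contains x = true
    · obtain ⟨j, hj⟩ := Option.isSome_iff_exists.mp
        (show (D.get? x).isSome by rw [← PySem.Dict.contains_eq_isSome_get?]; exact hc)
      have hA : stepA K (tot, det, D) ((n : Int), x) =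
          (tot + 1, (if (n : Int) - j ≤ K then det + 1 else det), D.insert x (n : Int)) := by
        simp [stepA, hc, hj]
      by_cases hk : (n : Int) - j ≤ K
      · have hB : stepB b K (tot, det) ((n : Int), x) = (tot + 1, det + 1) := by
          simp only [stepB]
          rw [if_pos (hpre.mpr hc), if_pos (hwin.mpr ⟨j, hj, hk⟩)]
        rw [hA, hB, if_pos hk, hcast]
        exact ih (n + 1) (tot + 1) (det + 1) _ hdrop' hInv'
      · have hB : stepB b K (tot, det) ((n : Int), x) = (tot + 1, det) := by
          simp only [stepB]
          rw [if_pos (hpre.mpr hc), if_neg ?_]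
          rintro hmem
          obtain ⟨j', hj', hk'⟩ := hwin.mp hmem
          rw [hj] at hj'
          exact hk (by rw [Option.some.inj hj']; exact hk')
        rw [hA, hB, if_neg hk, hcast]
        exact ih (n + 1) (tot + 1) det _ hdrop' hInv'
    · have hcf : D.contains x = false := by simpa using hc
      have hA : stepA K (tot, det, D) ((n : Int), x) = (tot, det, D.insert x (n : Int)) := by
        simp [stepA, hcf]
      have hB : stepB b K (tot, det) ((n : Int), x) = (tot, det) := by
        simp only [stepB]
        rw [if_neg]
        intro hmem
        exact hc (hpre.mp hmem)
      rw [hA, hB, hcast]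
      exact ih (n + 1) tot det _ hdrop' hInv'


-- ===== VERDICT (by name: the statement is the Claim_ definition above) =====
theorem VerificarFallas_spec : Claim_equal_VerificarFallas := by
  intro b K _
  unfold Spec_VerificarFallas VerificarFallas VerificarFallas_alt
  have h := mainLoop b K b 0 0 0 PySem.Dict.empty (by simp) (by
    intro t j
    constructor
    · intro h; simp [PySem.Dict.empty, PySem.Dict.get?] at h
    · intro h; obtain ⟨m, _, hm, _⟩ := h; simp at hm)
  simpa using h
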